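-- pv_equiv track=rewrite | github.com/jb410817/f2l_db | f2l_db.py | mirror_solution
-- ===== SOURCE A (Python) =====
-- def mirror_solution(solution):
--     mirror_map = {
--         # normal turns
--         "F": "F'", "F'": "F", "F2": "F2",
--         "L": "R'", "L'": "R", "L2": "R2",
--         "B": "B'", "B'": "B", "B2": "B2",
--         "R": "L'", "R'": "L", "R2": "L2",
--         "U": "U'", "U'": "U", "U2": "U2",
--         "D": "D'", "D'": "D", "D2": "D2",
--         # rotations
--         "X": "X'", "X'": "X", "X2": "X2",
--         "Y": "Y'", "Y'": "Y", "Y2": "Y2",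
--         "Z": "Z'", "Z'": "Z", "Z2": "Z2",
--         # slice turns
--         "E": "E'", "E'": "E", "E2": "E2",
--         "M": "M", "M'": "M'", "M2": "M2",
--         "S": "S'", "S'": "S", "S2": "S2",
--         # wide turns
--         "f": "f'", "f'": "f", "f2": "f2",
--         "l": "r'", "l'": "r", "l2": "r2",
--         "b": "b'", "b'": "b", "b2": "b2",
--         "r": "l'", "r'": "l", "r2": "l2",
--         "u": "u'", "u'": "u", "u2": "u2",
--         "d": "d'", "d'": "d", "d2": "d2",
--     }
--
--     result = ""
--     for turn in solution.split():
--         result += mirror_map[turn] + " "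
--
--     return result.strip()
-- ===== SOURCE B (Python) =====
-- FACE_SWAP = {'L': 'R', 'R': 'L', 'l': 'r', 'r': 'l'}
-- VALID_FACES = "FLBRUDXYZEMSflbrud"
-- FLIP = {'': "'", "'": '', '2': '2'}
--
--
-- def _mirror_token(turn):
--     face, suffix = turn[:1], turn[1:]
--     if face not in VALID_FACES or face == '' or suffix not in FLIP:
--         raise KeyError(turn)
--     new_face = FACE_SWAP.get(face, face)
--     new_suffix = suffix if face == 'M' else FLIP[suffix]
--     return new_face + new_suffix
--
--
-- def mirror_solution(solution):
--     return ' '.join(_mirror_token(turn) for turn in solution.split())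
-- ===== Notes on version B (the rewrite author's own statement) =====
-- stated objective: simpler
-- what changed: Replaces A's hand-written 54-entry mirror lookup table by decomposing each token into face and suffix, swapping L/R (and l/r) faces via a 4-entry map, flipping the direction suffix (with M kept as-is), and space-joining the mirrored tokens instead of A's accumulate-then-strip loop.
import Mathlib
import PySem

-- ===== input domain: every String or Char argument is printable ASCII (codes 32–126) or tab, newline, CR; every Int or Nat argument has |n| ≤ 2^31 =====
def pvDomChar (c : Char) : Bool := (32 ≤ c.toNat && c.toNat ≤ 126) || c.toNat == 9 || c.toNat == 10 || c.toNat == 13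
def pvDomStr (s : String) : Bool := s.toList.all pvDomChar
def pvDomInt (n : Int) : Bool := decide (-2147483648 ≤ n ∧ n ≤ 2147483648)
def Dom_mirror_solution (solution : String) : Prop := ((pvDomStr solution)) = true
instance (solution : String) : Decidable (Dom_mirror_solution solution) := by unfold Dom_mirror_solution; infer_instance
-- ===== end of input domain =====

-- B replaces A's 54-entry lookup table by splitting each token into face and suffix,
-- swapping L/R (and l/r) faces and flipping the direction suffix (objective: simpler).

-- ===== PORT A =====
def mirrorMapA : PySem.Dict String String := PySem.Dict.ofList [
  ("F", "F'"), ("F'", "F"), ("F2", "F2"),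
  ("L", "R'"), ("L'", "R"), ("L2", "R2"),
  ("B", "B'"), ("B'", "B"), ("B2", "B2"),
  ("R", "L'"), ("R'", "L"), ("R2", "L2"),
  ("U", "U'"), ("U'", "U"), ("U2", "U2"),
  ("D", "D'"), ("D'", "D"), ("D2", "D2"),
  ("X", "X'"), ("X'", "X"), ("X2", "X2"),
  ("Y", "Y'"), ("Y'", "Y"), ("Y2", "Y2"),
  ("Z", "Z'"), ("Z'", "Z"), ("Z2", "Z2"),
  ("E", "E'"), ("E'", "E"), ("E2", "E2"),
  ("M", "M"), ("M'", "M'"), ("M2", "M2"),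
  ("S", "S'"), ("S'", "S"), ("S2", "S2"),
  ("f", "f'"), ("f'", "f"), ("f2", "f2"),
  ("l", "r'"), ("l'", "r"), ("l2", "r2"),
  ("b", "b'"), ("b'", "b"), ("b2", "b2"),
  ("r", "l'"), ("r'", "l"), ("r2", "l2"),
  ("u", "u'"), ("u'", "u"), ("u2", "u2"),
  ("d", "d'"), ("d'", "d"), ("d2", "d2")]

-- mirror_map[turn] raises KeyError on an unknown token: Dict.get? is none exactly there,
-- the .getD "" default is unreachable under Pre_ (which excludes those inputs).
def mirror_solution (solution : String) : String :=
  let result := (PySem.Str.split₀ solution).foldl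
    (fun result turn => result ++ (PySem.Dict.get? mirrorMapA turn).getD "" ++ " ") ""
  PySem.Str.strip result

-- ===== PORT B =====
def faceSwapB : PySem.Dict String String := PySem.Dict.ofList
  [("L", "R"), ("R", "L"), ("l", "r"), ("r", "l")]

def flipB : PySem.Dict String String := PySem.Dict.ofList
  [("", "'"), ("'", ""), ("2", "2")]

-- Source B's _mirror_token; its 'raise KeyError(turn)' branch is outside Pre_, the port
-- returns "" there (unreachable under Pre_).
def mirrorTokenB (turn : String) : String :=
  let face := PySem.Str.slice turn none (some 1)
  let suffix := PySem.Str.slice turn (some 1) none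
  if !(PySem.Str.isIn face "FLBRUDXYZEMSflbrud") || face == "" || !(PySem.Dict.contains flipB suffix) then
    ""  -- KeyError(turn)
  else
    let newFace := (PySem.Dict.get? faceSwapB face).getD face
    let newSuffix := if face == "M" then suffix else (PySem.Dict.get? flipB suffix).getD ""
    newFace ++ newSuffix

def mirror_solution_alt (solution : String) : String :=
  PySem.Str.join " " ((PySem.Str.split₀ solution).map mirrorTokenB)

-- ===== PRECONDITION & SPEC =====
-- the 54 tokens A's mirror_map accepts (as a standalone literal, so Pre_ does not touch the ports)
def pvKeys : List String :=
  ["F", "F'", "F2", "L", "L'", "L2", "B", "B'", "B2", "R", "R'", "R2",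
   "U", "U'", "U2", "D", "D'", "D2", "X", "X'", "X2", "Y", "Y'", "Y2",
   "Z", "Z'", "Z2", "E", "E'", "E2", "M", "M'", "M2", "S", "S'", "S2",
   "f", "f'", "f2", "l", "l'", "l2", "b", "b'", "b2", "r", "r'", "r2",
   "u", "u'", "u2", "d", "d'", "d2"]

-- Pre_ excludes exactly the inputs containing a token outside mirror_map, on which A raises KeyError.
def Pre_mirror_solution (solution : String) : Prop :=
  ∀ t ∈ PySem.Str.split₀ solution, t ∈ pvKeys
instance (solution : String) : Decidable (Pre_mirror_solution solution) := by
  unfold Pre_mirror_solution; infer_instance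

def pvWitness_mirror_solution : String := "R U R' U' M2  f2"

def Spec_mirror_solution (solution : String) (out : String) : Prop := out = mirror_solution_alt solution
instance (solution : String) (out : String) : Decidable (Spec_mirror_solution solution out) := by unfold Spec_mirror_solution; infer_instance

-- ===== CLAIM (what is proved, stated in full; the proofs are below) =====
def Claim_equal_mirror_solution : Prop := ∀ (solution : String), Dom_mirror_solution solution → Pre_mirror_solution solution → Spec_mirror_solution solution (mirror_solution solution)

-- ===== LEMMAS AND PROOFS =====

-- a mirrored token is nonempty and starts/ends with a non-whitespace character
def pvGood (w : List Char) : Bool :=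
  !w.isEmpty && w.head?.all (fun c => !PySem.Chars.isspace c)
    && w.getLast?.all (fun c => !PySem.Chars.isspace c)

set_option maxRecDepth 8192 in
theorem pv_tok_eq_and_good :
    pvKeys.all (fun t =>
      (mirrorTokenB t == (PySem.Dict.get? mirrorMapA t).getD "")
        && pvGood (mirrorTokenB t).toList) = true := by decide

theorem pv_lstrip_cons {c : Char} (l : List Char) (hc : PySem.Chars.isspace c = false) :
    PySem.Chars.lstrip (c :: l) = c :: l := by
  simp [PySem.Chars.lstrip, hc]

theorem pv_rstrip_eq_self {w : List Char}
    (hl : w.getLast?.all (fun c => !PySem.Chars.isspace c) = true) :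
    PySem.Chars.rstrip w = w := by
  unfold PySem.Chars.rstrip
  rcases hrev : w.reverse with _ | ⟨c, rest⟩
  · simp at hrev; simp [hrev]
  · have hc : PySem.Chars.isspace c = false := by
      have : w.getLast? = some c := by rw [← List.head?_reverse, hrev]; rfl
      simpa [this] using hl
    rw [List.dropWhile_cons, hc]
    simp [← hrev]

theorem pv_rstrip_append_space (w : List Char) :
    PySem.Chars.rstrip (w ++ [' ']) = PySem.Chars.rstrip w := by
  unfold PySem.Chars.rstrip
  rw [List.reverse_append]
  simp [PySem.Chars.isspace]

theorem pv_rstrip_append_of_ne {b : List Char} (a : List Char)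
    (h : PySem.Chars.rstrip b ≠ []) :
    PySem.Chars.rstrip (a ++ b) = a ++ PySem.Chars.rstrip b := by
  unfold PySem.Chars.rstrip at *
  have hdw : (List.dropWhile PySem.Chars.isspace b.reverse) ≠ [] := by
    intro he; exact h (by simp [he])
  rw [List.reverse_append, List.dropWhile_append]
  simp [List.isEmpty_iff, hdw]

theorem pv_join_ne_nil {w : List Char} {rest : List (List Char)} (hne : w ≠ []) :
    PySem.Chars.join [' '] (w :: rest) ≠ [] := by
  cases rest with
  | nil => simpa [PySem.Chars.join_singleton] using hne
  | cons w2 rest' =>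
      rw [PySem.Chars.join_cons_cons]
      rcases w with _ | ⟨c, l⟩
      · exact absurd rfl hne
      · simp

-- core: strip of the fold's "token + space" concatenation is the space-join of the tokens
theorem pv_strip_flatMap (ms : List (List Char)) (h : ∀ w ∈ ms, pvGood w = true) :
    PySem.Chars.strip (ms.flatMap (fun w => w ++ [' '])) = PySem.Chars.join [' '] ms := by
  induction ms with
  | nil => simp [PySem.Chars.strip, PySem.Chars.lstrip, PySem.Chars.rstrip, PySem.Chars.join_nil]
  | cons w rest ih =>
      have hw := h w (by simp)
      obtain ⟨c, l, rfl⟩ : ∃ c l, w = c :: l := by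
        rcases w with _ | ⟨c, l⟩
        · simp [pvGood] at hw
        · exact ⟨c, l, rfl⟩
      have hc : PySem.Chars.isspace c = false := by
        simp [pvGood] at hw; simpa using hw.1
      have hlast : (c :: l).getLast?.all (fun x => !PySem.Chars.isspace x) = true := by
        simp [pvGood] at hw; simpa using hw.2
      cases rest with
      | nil =>
          rw [PySem.Chars.join_singleton]
          show PySem.Chars.strip ((c :: l) ++ [' '] ++ []) = c :: l
          rw [List.append_nil]
          unfold PySem.Chars.strip
          rw [show (c :: l) ++ [' '] = c :: (l ++ [' ']) from rfl,
              pv_lstrip_cons _ hc,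
              show c :: (l ++ [' ']) = (c :: l) ++ [' '] from rfl,
              pv_rstrip_append_space]
          exact pv_rstrip_eq_self hlast
      | cons w2 rest' =>
          have hrest : ∀ v ∈ w2 :: rest', pvGood v = true := fun v hv => h v (by simp [hv])
          have hX := ih hrest
          have hw2ne : w2 ≠ [] := by
            have := hrest w2 (by simp)
            rcases w2 with _ | _
            · simp [pvGood] at this
            · simp
          -- lstrip leaves the flatMap of good tokens unchanged (its head is w2's head)
          have hXl : PySem.Chars.lstrip ((w2 :: rest').flatMap (fun v => v ++ [' '])) =
              (w2 :: rest').flatMap (fun v => v ++ [' ']) := by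
            obtain ⟨c2, l2, rfl⟩ : ∃ c2 l2, w2 = c2 :: l2 := by
              rcases w2 with _ | ⟨c2, l2⟩
              · exact absurd rfl hw2ne
              · exact ⟨c2, l2, rfl⟩
            have hc2 : PySem.Chars.isspace c2 = false := by
              have := hrest _ (by simp : (c2 :: l2) ∈ (c2 :: l2) :: rest')
              simp [pvGood] at this; simpa using this.1
            simpa using pv_lstrip_cons (l2 ++ [' '] ++ rest'.flatMap (fun v => v ++ [' '])) hc2
          have hXr : PySem.Chars.rstrip ((w2 :: rest').flatMap (fun v => v ++ [' '])) =
              PySem.Chars.join [' '] (w2 :: rest') := by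
            have : PySem.Chars.strip ((w2 :: rest').flatMap (fun v => v ++ [' '])) =
                PySem.Chars.rstrip ((w2 :: rest').flatMap (fun v => v ++ [' '])) := by
              unfold PySem.Chars.strip; rw [hXl]
            rw [← this, hX]
          have hXne : PySem.Chars.rstrip ((w2 :: rest').flatMap (fun v => v ++ [' '])) ≠ [] := by
            rw [hXr]; exact pv_join_ne_nil hw2ne
          rw [PySem.Chars.join_cons_cons]
          show PySem.Chars.strip ((c :: l) ++ [' '] ++ (w2 :: rest').flatMap (fun v => v ++ [' '])) = _
          unfold PySem.Chars.strip
          rw [show (c :: l) ++ [' '] ++ (w2 :: rest').flatMap (fun v => v ++ [' ']) =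
                c :: (l ++ [' '] ++ (w2 :: rest').flatMap (fun v => v ++ [' '])) by simp,
              pv_lstrip_cons _ hc,
              show c :: (l ++ [' '] ++ (w2 :: rest').flatMap (fun v => v ++ [' '])) =
                ((c :: l) ++ [' ']) ++ (w2 :: rest').flatMap (fun v => v ++ [' ']) by simp,
              pv_rstrip_append_of_ne _ hXne, hXr]

theorem pv_foldl_toList (ws : List String) (f : String → String) (acc : String) :
    (ws.foldl (fun r t => r ++ f t ++ " ") acc).toList =
      ws.foldl (fun r t => r ++ ((f t).toList ++ [' '])) acc.toList := by
  induction ws generalizing acc with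
  | nil => rfl
  | cons t ws ih =>
      rw [List.foldl_cons, List.foldl_cons, ih]
      simp [String.toList_append]

-- ===== VERDICT (by name: the statement is the Claim_ definition above) =====
set_option maxRecDepth 8192 in
theorem mirror_solution_spec : Claim_equal_mirror_solution := by
  intro solution _ hpre
  unfold Spec_mirror_solution mirror_solution mirror_solution_alt
  apply String.toList_inj.mp
  rw [PySem.Str.toList_strip, PySem.Str.toList_join, pv_foldl_toList]
  have htok : ∀ t ∈ PySem.Str.split₀ solution,
      (PySem.Dict.get? mirrorMapA t).getD "" = mirrorTokenB t ∧
        pvGood (mirrorTokenB t).toList = true := by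
    intro t ht
    have hk := hpre t ht
    have := List.all_eq_true.mp pv_tok_eq_and_good t hk
    exact ⟨(beq_iff_eq.mp (Bool.and_elim_left this)).symm, Bool.and_elim_right this⟩
  rw [PySem.List.foldl_congr_mem (PySem.Str.split₀ solution)
      (fun r t => r ++ (((PySem.Dict.get? mirrorMapA t).getD "").toList ++ [' ']))
      (fun r t => r ++ ((mirrorTokenB t).toList ++ [' '])) "".toList
      (by intro acc t ht; exact congrArg (fun w => acc ++ (w.toList ++ [' '])) (htok t ht).1),
    PySem.List.foldl_append_eq_flatMap]
  have hfm : (PySem.Str.split₀ solution).flatMap (fun t => (mirrorTokenB t).toList ++ [' ']) =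
      ((PySem.Str.split₀ solution).map (fun t => (mirrorTokenB t).toList)).flatMap
        (fun w => w ++ [' ']) := by
    rw [List.flatMap_map]
  have h0 : "".toList = ([] : List Char) := rfl
  rw [h0, List.nil_append, hfm,
    pv_strip_flatMap _ (by
      intro w hw
      obtain ⟨t, ht, rfl⟩ := List.mem_map.mp hw
      exact (htok t ht).2)]
  rw [List.map_map]
  have hsep : " ".toList = ([' '] : List Char) := rfl
  have hfun : (String.toList ∘ mirrorTokenB) = (fun t => (mirrorTokenB t).toList) := rfl
  rw [hsep, hfun]
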